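-- pv_equiv track=rewrite | github.com/BashCtl/python-edabit | medium/likes_vs_dislikes.py | like_or_dislike
-- ===== SOURCE A (Python) =====
-- def like_or_dislike(lst):
--     state = "Nothing"
--     for item in lst:
--         if item == "Like":
--             if state == "Dislike":
--                 state = "Like"
--             elif state == "Like":
--                 state = "Nothing"
--             else:
--                 state = "Like"
--         if item == "Dislike":
--             if state == "Like":
--                 state = "Dislike"
--             elif state == "Dislike":
--                 state = "Nothing"
--             else:
--                 state = "Dislike"
--     return state
-- ===== SOURCE B (Python) =====
-- def like_or_dislike(lst):
--     kept = [x for x in lst if x == "Like" or x == "Dislike"]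
--     if not kept:
--         return "Nothing"
--     v = kept[-1]
--     run = 0
--     for x in reversed(kept):
--         if x != v:
--             break
--         run += 1
--     return v if run % 2 == 1 else "Nothing"
-- ===== Notes on version B (the rewrite author's own statement) =====
-- stated objective: simpler
-- what changed: Replaces the step-by-step state-machine fold with a direct computation: filter to Like/Dislike, then the result is the last element if its trailing run has odd length, else Nothing.
import Mathlib
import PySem

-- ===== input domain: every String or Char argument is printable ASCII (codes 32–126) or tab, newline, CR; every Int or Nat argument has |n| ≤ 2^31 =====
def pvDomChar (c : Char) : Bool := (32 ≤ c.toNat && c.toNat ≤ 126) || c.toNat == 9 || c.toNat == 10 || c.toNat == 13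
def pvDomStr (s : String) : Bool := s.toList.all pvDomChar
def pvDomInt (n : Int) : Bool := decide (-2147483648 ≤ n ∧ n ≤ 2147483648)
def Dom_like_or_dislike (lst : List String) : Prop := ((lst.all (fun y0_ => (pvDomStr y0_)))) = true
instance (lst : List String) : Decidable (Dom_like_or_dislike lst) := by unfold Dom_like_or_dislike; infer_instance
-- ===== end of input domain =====

-- B replaces A's step-by-step state-machine fold by the parity of the trailing run of the
-- filtered Like/Dislike list (simpler, same O(n) cost).


-- ===== PORT A =====
-- the body of A's for-loop: two sequential ifs, branches in A's order
def pvStepA (state item : String) : String :=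
  let s1 :=
    if item == "Like" then
      (if state == "Dislike" then "Like"
       else if state == "Like" then "Nothing"
       else "Like")
    else state
  if item == "Dislike" then
    (if s1 == "Like" then "Dislike"
     else if s1 == "Dislike" then "Nothing"
     else "Dislike")
  else s1

def like_or_dislike (lst : List String) : String :=
  lst.foldl pvStepA "Nothing"

-- ===== PORT B =====
-- counting loop over the reversed kept list, stopping at the first element ≠ v (the `break`)
def pvRun (v : String) : List String → Nat
  | [] => 0
  | x :: xs => if x == v then pvRun v xs + 1 else 0

def like_or_dislike_alt (lst : List String) : String :=
  let kept := lst.filter (fun x => x == "Like" || x == "Dislike")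
  match kept.reverse with
  | [] => "Nothing"
  | v :: rest =>
    let run := pvRun v (v :: rest)
    if run % 2 == 1 then v else "Nothing"

-- ===== PRECONDITION & SPEC =====
def Spec_like_or_dislike (lst : List String) (out : String) : Prop := out = like_or_dislike_alt lst
instance (lst : List String) (out : String) : Decidable (Spec_like_or_dislike lst out) := by unfold Spec_like_or_dislike; infer_instance

-- ===== CLAIM (what is proved, stated in full; the proofs are below) =====
def Claim_equal_like_or_dislike : Prop := ∀ (lst : List String), Dom_like_or_dislike lst → Spec_like_or_dislike lst (like_or_dislike lst)

-- ===== LEMMAS AND PROOFS =====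

-- B's answer as a function of the reversed filtered list
def pvG : List String → String
  | [] => "Nothing"
  | v :: rest => if pvRun v (v :: rest) % 2 == 1 then v else "Nothing"

theorem alt_eq_g (lst : List String) :
    like_or_dislike_alt lst = pvG ((lst.filter (fun x => x == "Like" || x == "Dislike")).reverse) := by
  cases h : (lst.filter (fun x => x == "Like" || x == "Dislike")).reverse with
  | nil => simp [like_or_dislike_alt, pvG, h]
  | cons v rest => simp [like_or_dislike_alt, pvG, h]

theorem stepA_other (s x : String) (h1 : x ≠ "Like") (h2 : x ≠ "Dislike") :
    pvStepA s x = s := by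
  simp [pvStepA, h1, h2]

theorem stepA_like (s : String) :
    pvStepA s "Like" = if s == "Like" then "Nothing" else "Like" := by
  by_cases h : s = "Dislike"
  · subst h; rfl
  · simp [pvStepA, h]

theorem stepA_dislike (s : String) :
    pvStepA s "Dislike" = if s == "Dislike" then "Nothing" else "Dislike" := by
  by_cases h : s = "Like"
  · subst h; rfl
  · simp only [pvStepA, beq_iff_eq]
    simp [h]

-- the key step: pressing x ∈ {Like, Dislike} on A's state corresponds to prepending x on B's side
theorem step_g (x : String) (hx : x = "Like" ∨ x = "Dislike") (r : List String) :
    pvStepA (pvG r) x = pvG (x :: r) := by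
  have hstep : ∀ s : String, pvStepA s x = if s == x then "Nothing" else x := by
    rcases hx with rfl | rfl
    · exact stepA_like
    · exact stepA_dislike
  cases r with
  | nil =>
    simp [hstep, pvG, pvRun]
  | cons y r' =>
    by_cases hyx : y = x
    · subst hyx
      -- head of r equals x: parity toggles
      have hrun : pvRun y (y :: y :: r') = pvRun y (y :: r') + 1 := by
        simp [pvRun]
      simp only [pvG, hstep, hrun]
      rcases Nat.even_or_odd (pvRun y (y :: r')) with he | ho
      · obtain ⟨k, hk⟩ := he
        have h1 : pvRun y (y :: r') % 2 = 0 := by omega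
        have h2 : (pvRun y (y :: r') + 1) % 2 = 1 := by omega
        simp [h1, h2]
      · obtain ⟨k, hk⟩ := ho
        have h1 : pvRun y (y :: r') % 2 = 1 := by omega
        have h2 : (pvRun y (y :: r') + 1) % 2 = 0 := by omega
        simp [h1, h2]
    · -- head of r differs from x: the new run has length 1
      have hrun : pvRun x (x :: y :: r') = 1 := by
        simp [pvRun, hyx]
      have hgr : pvG (y :: r') = y ∨ pvG (y :: r') = "Nothing" := by
        simp only [pvG]
        split <;> simp
      have hne : pvG (y :: r') ≠ x := by
        rcases hgr with h | h <;> rw [h]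
        · exact hyx
        · rcases hx with rfl | rfl <;> decide
      rw [hstep (pvG (y :: r'))]
      have hb : (pvG (y :: r') == x) = false := by simpa using hne
      rw [hb]
      simp [pvG, hrun]

theorem fold_eq_g (lst : List String) :
    lst.foldl pvStepA "Nothing" = pvG ((lst.filter (fun x => x == "Like" || x == "Dislike")).reverse) := by
  induction lst using List.reverseRecOn with
  | nil => rfl
  | append_singleton l x ih =>
    rw [List.foldl_append, List.filter_append]
    by_cases hx : x = "Like" ∨ x = "Dislike"
    · have hpx : (x == "Like" || x == "Dislike") = true := by
        rcases hx with rfl | rfl <;> simp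
      simp only [List.foldl, List.filter, hpx, List.reverse_append, List.reverse_cons,
        List.reverse_nil, List.nil_append, List.cons_append]
      rw [ih, step_g x hx]
    · rw [not_or] at hx
      have hpx : (x == "Like" || x == "Dislike") = false := by
        simp [hx.1, hx.2]
      simp only [List.foldl, List.filter, hpx, List.reverse_append, List.reverse_nil,
        List.nil_append]
      rw [ih, stepA_other _ _ hx.1 hx.2]

-- ===== VERDICT (by name: the statement is the Claim_ definition above) =====
theorem like_or_dislike_spec : Claim_equal_like_or_dislike := by
  intro lst _
  unfold Spec_like_or_dislike like_or_dislike
  rw [alt_eq_g, fold_eq_g]
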